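-- pv_equiv track=rewrite | github.com/schwartz1375/kiro-forge | src/kiroforge/cli.py | _normalize_code_fences
-- ===== SOURCE A (Python) =====
-- def _normalize_code_fences(text: str) -> str:
--     lines = text.splitlines()
--     result: list[str] = []
--     in_fence = False
--     fence_langs = {"json", "http", "bash", "shell", "javascript", "yaml", "yml"}
--     i = 0
--     while i < len(lines):
--         line = lines[i]
--         stripped = line.strip().lower()
--         if stripped.startswith("```"):
--             in_fence = not in_fence
--             result.append(line)
--             i += 1
--             continue
--         if not in_fence and stripped in fence_langs:
--             result.append(f"```{stripped}")
--             i += 1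
--             while i < len(lines) and lines[i].strip() != "":
--                 result.append(lines[i])
--                 i += 1
--             result.append("```")
--             continue
--         result.append(line)
--         i += 1
--     return "\n".join(result)
-- ===== SOURCE B (Python) =====
-- def _normalize_code_fences(text: str) -> str:
--     fence_langs = {"json", "http", "bash", "shell", "javascript", "yaml", "yml"}
--     out: list[str] = []
--     in_fence = False
--     in_auto = False
--     for line in text.splitlines():
--         if in_auto:
--             if line.strip() != "":
--                 out.append(line)
--                 continue
--             out.append("```")
--             in_auto = False
--         stripped = line.strip().lower()
--         if stripped.startswith("```"):
--             in_fence = not in_fence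
--             out.append(line)
--         elif not in_fence and stripped in fence_langs:
--             out.append("```" + stripped)
--             in_auto = True
--         else:
--             out.append(line)
--     if in_auto:
--         out.append("```")
--     return "\n".join(out)
-- ===== Notes on version B (the rewrite author's own statement) =====
-- stated objective: simpler
-- what changed: Replaced the index-driven while loop with a nested inner consuming loop by a single flat pass over the lines maintaining an in_auto_block flag (blank line closes the auto block and falls through; a trailing close is emitted after the loop).
import Mathlib
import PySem

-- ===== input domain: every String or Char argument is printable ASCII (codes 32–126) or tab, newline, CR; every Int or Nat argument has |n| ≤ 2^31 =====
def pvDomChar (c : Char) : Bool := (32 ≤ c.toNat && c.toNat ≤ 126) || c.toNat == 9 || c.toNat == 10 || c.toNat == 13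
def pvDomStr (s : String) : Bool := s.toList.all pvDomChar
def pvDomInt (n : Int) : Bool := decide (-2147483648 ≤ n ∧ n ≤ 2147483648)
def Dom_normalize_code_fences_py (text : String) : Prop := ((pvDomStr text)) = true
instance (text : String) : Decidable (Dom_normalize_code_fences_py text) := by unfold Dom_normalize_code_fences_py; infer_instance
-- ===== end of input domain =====

-- B is a single flat pass with an in-auto-block flag instead of A's index-driven loop with a nested inner loop; objective: simpler.

def pvFenceLangs : List String := ["json", "http", "bash", "shell", "javascript", "yaml", "yml"]

-- ===== PORT A =====
-- inner while loop of A: collect lines until a blank (or end), return (collected, remaining)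
def pvInnerA : List String → List String × List String
  | [] => ([], [])
  | l :: rest =>
    if PySem.Str.strip l ≠ "" then
      let (c, r) := pvInnerA rest
      (l :: c, r)
    else ([], l :: rest)

theorem pvInnerA_len : ∀ (xs : List String), (pvInnerA xs).2.length ≤ xs.length
  | [] => Nat.le_refl _
  | l :: rest => by
    unfold pvInnerA
    split
    · simpa using Nat.le_succ_of_le (pvInnerA_len rest)
    · simp

def pvLoopA : List String → Bool → List String
  | [], _ => []
  | line :: rest, in_fence =>
    let stripped := PySem.Str.lower (PySem.Str.strip line)
    if PySem.Str.startswith stripped "```" then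
      line :: pvLoopA rest (!in_fence)
    else if !in_fence && stripped ∈ pvFenceLangs then
      ("```" ++ stripped) :: ((pvInnerA rest).1 ++ "```" :: pvLoopA (pvInnerA rest).2 in_fence)
    else
      line :: pvLoopA rest in_fence
termination_by xs _ => xs.length
decreasing_by
  · simp
  · have := pvInnerA_len rest
    simp only [List.length_cons]
    omega
  · simp

def normalize_code_fences_py (text : String) : String :=
  PySem.Str.join "\n" (pvLoopA (PySem.Str.splitlines text) false)

-- ===== PORT B =====
mutual
-- normal handling of one line (the part of B's loop body after the auto-block check)
def pvHandleB : String → List String → Bool → List String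
  | line, rest, in_fence =>
    let stripped := PySem.Str.lower (PySem.Str.strip line)
    if PySem.Str.startswith stripped "```" then
      line :: pvLoopB rest (!in_fence) false
    else if !in_fence && stripped ∈ pvFenceLangs then
      ("```" ++ stripped) :: pvLoopB rest in_fence true
    else
      line :: pvLoopB rest in_fence false
termination_by line rest _ => 2 * rest.length + 1

def pvLoopB : List String → Bool → Bool → List String
  | [], _, in_auto => if in_auto then ["```"] else []
  | line :: rest, in_fence, in_auto =>
    if in_auto then
      if PySem.Str.strip line ≠ "" then line :: pvLoopB rest in_fence true
      else "```" :: pvHandleB line rest in_fence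
    else pvHandleB line rest in_fence
termination_by xs _ _ => 2 * xs.length
decreasing_by all_goals (simp only [List.length_cons]; omega)
end

def normalize_code_fences_py_alt (text : String) : String :=
  PySem.Str.join "\n" (pvLoopB (PySem.Str.splitlines text) false false)

-- ===== PRECONDITION & SPEC =====
def Spec_normalize_code_fences_py (text : String) (out : String) : Prop := out = normalize_code_fences_py_alt text
instance (text : String) (out : String) : Decidable (Spec_normalize_code_fences_py text out) := by unfold Spec_normalize_code_fences_py; infer_instance

-- ===== CLAIM (what is proved, stated in full; the proofs are below) =====
def Claim_equal_normalize_code_fences_py : Prop := ∀ (text : String), Dom_normalize_code_fences_py text → Spec_normalize_code_fences_py text (normalize_code_fences_py text)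

-- ===== LEMMAS AND PROOFS =====

theorem pvLoops_eq : ∀ (n : ℕ) (lines : List String), lines.length ≤ n →
    (∀ f : Bool, pvLoopA lines f = pvLoopB lines f false) ∧
    ((pvInnerA lines).1 ++ "```" :: pvLoopA (pvInnerA lines).2 false = pvLoopB lines false true) := by
  intro n
  induction n with
  | zero =>
    intro lines h
    have : lines = [] := List.eq_nil_of_length_eq_zero (Nat.le_zero.mp h)
    subst this
    exact ⟨fun f => by simp [pvLoopA, pvLoopB], by simp [pvInnerA, pvLoopA, pvLoopB]⟩
  | succ n ih =>
    intro lines h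
    cases lines with
    | nil =>
      exact ⟨fun f => by simp [pvLoopA, pvLoopB], by simp [pvInnerA, pvLoopA, pvLoopB]⟩
    | cons line rest =>
      have hr : rest.length ≤ n := Nat.lt_succ_iff.mp (Nat.lt_of_lt_of_le (by simp) h)
      constructor
      · intro f
        rw [pvLoopA, pvLoopB]
        simp only [Bool.false_eq_true, if_false]
        rw [pvHandleB]
        by_cases h1 : PySem.Str.startswith (PySem.Str.lower (PySem.Str.strip line)) "```" = true
        · rw [if_pos h1, if_pos h1, (ih rest hr).1]
        · rw [if_neg h1, if_neg h1]
          by_cases h2 : (!f && decide (PySem.Str.lower (PySem.Str.strip line) ∈ pvFenceLangs)) = true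
          · have hf : f = false := by
              cases f with
              | false => rfl
              | true => simp at h2
            subst hf
            rw [if_pos h2, if_pos h2, ← (ih rest hr).2]
          · rw [if_neg h2, if_neg h2, (ih rest hr).1]
      · rw [pvLoopB]
        by_cases hb : PySem.Str.strip line ≠ ""
        · rw [pvInnerA]
          simp only [if_pos hb, ← (ih rest hr).2]
          simp
        · rw [pvInnerA]
          simp only [if_neg hb]
          rw [Ne, not_not] at hb
          rw [pvLoopA, pvHandleB]
          have hs : PySem.Str.lower (PySem.Str.strip line) = "" := by rw [hb]; rfl
          rw [hs]
          have h1 : ¬ (PySem.Str.startswith "" "```" = true) := by decide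
          rw [if_neg h1, if_neg h1]
          have h2 : ¬ ((!false && decide (("" : String) ∈ pvFenceLangs)) = true) := by decide
          rw [if_neg h2, if_neg h2, (ih rest hr).1]
          simp

-- ===== VERDICT (by name: the statement is the Claim_ definition above) =====
theorem normalize_code_fences_py_spec : Claim_equal_normalize_code_fences_py := by
  intro text _
  unfold Spec_normalize_code_fences_py normalize_code_fences_py normalize_code_fences_py_alt
  rw [(pvLoops_eq (PySem.Str.splitlines text).length _ (Nat.le_refl _)).1]
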